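-- pv_equiv track=rewrite | github.com/ericzhang98/dotfiles | algo_library/max_bipartite_matching.py | make_coloring
-- ===== SOURCE A (Python) =====
-- def make_coloring(edges):
--     coloring = [[], []]
--     visited = set()
--     def dfs(u, color):
--         if u in visited:
--             return
--         visited.add(u)
--         coloring[color].append(u)
--         for v in edges[u]:
--             dfs(v, 1-color)
--     for u in edges:
--         dfs(u, 0)
--     return coloring
-- ===== SOURCE B (Python) =====
-- def make_coloring(edges):
--     # One explicit stack seeded with every key at color 0; record the visit
--     # order as (node, color) pairs, then split into the two color classes.
--     # Keys later in the stack are only reached after everything pushed above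
--     # them is exhausted, so this reproduces the per-key recursive pre-order
--     # and first-visit colors exactly.
--     visited = set()
--     order = []
--     stack = [(u, 0) for u in reversed(list(edges))]
--     while stack:
--         u, c = stack.pop()
--         if u in visited:
--             continue
--         visited.add(u)
--         order.append((u, c))
--         for v in reversed(edges[u]):
--             stack.append((v, 1 - c))
--     return [[u for u, c in order if c == 0],
--             [u for u, c in order if c == 1]]
-- ===== Notes on version B (the rewrite author's own statement) =====
-- stated objective: alternative
-- what changed: Replaces the recursive per-key DFS that mutates two color lists with a single iterative run over one explicit stack seeded with all keys, recording one (node, color) visit-order list and splitting it into the two color classes afterwards.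
-- outside the precondition, e.g. on make_coloring({0: [1]}): A raises KeyError, B raises KeyError
import Mathlib
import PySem

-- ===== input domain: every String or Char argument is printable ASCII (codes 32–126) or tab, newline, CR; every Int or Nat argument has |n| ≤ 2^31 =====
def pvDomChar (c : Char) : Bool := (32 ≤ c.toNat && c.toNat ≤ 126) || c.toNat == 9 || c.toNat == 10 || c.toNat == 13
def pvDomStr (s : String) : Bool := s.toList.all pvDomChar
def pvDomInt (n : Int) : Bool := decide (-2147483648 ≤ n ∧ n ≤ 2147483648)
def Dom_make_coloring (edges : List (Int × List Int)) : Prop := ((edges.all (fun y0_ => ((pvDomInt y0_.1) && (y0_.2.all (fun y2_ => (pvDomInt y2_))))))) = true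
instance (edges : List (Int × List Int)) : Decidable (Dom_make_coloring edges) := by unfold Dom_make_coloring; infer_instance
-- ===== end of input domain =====

-- B replaces the recursive per-key DFS mutating two color lists with one iterative run over
-- a single stack seeded with all keys, recording a (node, color) visit-order list that is
-- split into the two color classes at the end — an alternative decomposition, not faster.

-- ===== PORT A =====
-- dict lookup edges[u]; under Pre_ keys are distinct, so first match is Python's dict lookup.
-- On a missing key Python raises KeyError (excluded by Pre_); the port returns [] there.
def pvLook (edges : List (Int × List Int)) (u : Int) : List Int :=
  ((edges.find? (fun p => p.1 == u)).map Prod.snd).getD []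

-- State of A's traversal: (visited set, coloring[0], coloring[1]).
-- the recursive dfs; fuel is a totality device only (edges.length + 2 is always enough
-- under Pre_: the recursion depth is bounded by the number of unvisited keys).
def dfsA (edges : List (Int × List Int)) :
    Nat → Int → Int → (PySem.Set Int × List Int × List Int) → (PySem.Set Int × List Int × List Int)
  | 0, _, _, st => st
  | f+1, u, c, st =>
    if PySem.Set.contains st.1 u then st
    else
      let st1 := (PySem.Set.add st.1 u,
        if c == 0 then (st.2.1 ++ [u], st.2.2) else (st.2.1, st.2.2 ++ [u]))
      (pvLook edges u).foldl (fun s v => dfsA edges f v (1 - c) s) st1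

-- 'for u in edges' iterates the dict's keys; under Pre_ (distinct keys) these are edges.map fst.
def make_coloring (edges : List (Int × List Int)) : List (List Int) :=
  let st := (edges.map Prod.fst).foldl
    (fun st u => dfsA edges (edges.length + 2) u 0 st) (PySem.Set.empty, [], [])
  [st.2.1, st.2.2]

-- ===== PORT B =====
-- The stack is held top-first (head = top of Python's list), so Python's initial
-- '[(u, 0) for u in reversed(list(edges))]' popped from the end is the key list in order,
-- and pushing reversed(edges[u]) is prepending edges[u] in order.
-- Fuel is a totality device only (each iteration pops one entry; under Pre_ the stated
-- fuel bounds the total number of pushes plus one).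
def loopB (edges : List (Int × List Int)) :
    Nat → List (Int × Int) → (PySem.Set Int × List (Int × Int)) → (PySem.Set Int × List (Int × Int))
  | 0, _, st => st
  | _+1, [], st => st
  | f+1, (u, c) :: rest, st =>
    if PySem.Set.contains st.1 u then loopB edges f rest st
    else
      loopB edges f ((pvLook edges u).map (fun v => (v, 1 - c)) ++ rest)
        (PySem.Set.add st.1 u, st.2 ++ [(u, c)])

def make_coloring_alt (edges : List (Int × List Int)) : List (List Int) :=
  let fb := edges.length * ((edges.map (fun p => p.2.length)).sum + 2) + 2
  let r := loopB edges fb (edges.map (fun p => (p.1, (0 : Int)))) (PySem.Set.empty, [])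
  [(r.2.filter (fun t => t.2 == 0)).map Prod.fst,
   (r.2.filter (fun t => t.2 == 1)).map Prod.fst]

-- ===== PRECONDITION & SPEC =====
-- Pre_ excludes (i) inputs whose association list has duplicate keys, on which the Python
-- dict collapses entries (last value wins) while the assoc-list ports read the first match —
-- an artefact of the list↔dict boundary, both Pythons still agree there — and (ii) inputs
-- with a neighbor that is not a key, on which Python A (and B) raise KeyError.
def Pre_make_coloring (edges : List (Int × List Int)) : Prop :=
  (edges.map Prod.fst).Nodup ∧ ∀ p ∈ edges, ∀ v ∈ p.2, v ∈ edges.map Prod.fst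
instance (edges : List (Int × List Int)) : Decidable (Pre_make_coloring edges) := by
  unfold Pre_make_coloring; infer_instance

def pvWitness_make_coloring : (List (Int × List Int)) := [(0, [1]), (1, [0, 2]), (2, [])]

def Spec_make_coloring (edges : List (Int × List Int)) (out : List (List Int)) : Prop := out = make_coloring_alt edges
instance (edges : List (Int × List Int)) (out : List (List Int)) : Decidable (Spec_make_coloring edges out) := by unfold Spec_make_coloring; infer_instance

-- ===== CLAIM (what is proved, stated in full; the proofs are below) =====
def Claim_equal_make_coloring : Prop := ∀ (edges : List (Int × List Int)), Dom_make_coloring edges → Pre_make_coloring edges → Spec_make_coloring edges (make_coloring edges)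

-- ===== LEMMAS AND PROOFS =====

-- the color-class projection of the visit-order list
def pvSp (c : Int) (ord : List (Int × Int)) : List Int :=
  (ord.filter (fun t => t.2 == c)).map Prod.fst

theorem pvSp_append (c c' : Int) (ord : List (Int × Int)) (u : Int) :
    pvSp c' (ord ++ [(u, c)]) = pvSp c' ord ++ (if c == c' then [u] else []) := by
  by_cases h : c == c' <;> simp [pvSp, List.filter_append, h]

-- number of keys not yet visited: the termination measure of the DFS
def pvUnv (edges : List (Int × List Int)) (vis : List Int) : Nat :=
  ((edges.map Prod.fst).filter (fun k => !(vis.contains k))).length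

theorem pv_foldl_pres {α β : Type} {P : β → Prop} (step : β → α → β) (l : List α) (st : β)
    (h : ∀ st v, v ∈ l → P st → P (step st v)) (h0 : P st) : P (l.foldl step st) := by
  induction l generalizing st with
  | nil => exact h0
  | cons a t ih =>
    exact ih _ (fun st v hv => h st v (List.mem_cons_of_mem _ hv)) (h st a (List.mem_cons_self) h0)

theorem pv_foldl_congr_inv {α β : Type} {P : β → Prop} (s1 s2 : β → α → β) (l : List α) (st : β)
    (h : ∀ st v, v ∈ l → P st → s1 st v = s2 st v)
    (hp : ∀ st v, v ∈ l → P st → P (s1 st v)) (h0 : P st) :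
    l.foldl s1 st = l.foldl s2 st := by
  induction l generalizing st with
  | nil => rfl
  | cons a t ih =>
    rw [List.foldl_cons, List.foldl_cons, ← h st a List.mem_cons_self h0]
    exact ih _ (fun st v hv => h st v (List.mem_cons_of_mem _ hv))
      (fun st v hv => hp st v (List.mem_cons_of_mem _ hv)) (hp st a List.mem_cons_self h0)

theorem pv_filter_le {α : Type} (l : List α) (p q : α → Bool)
    (h : ∀ x ∈ l, q x = true → p x = true) :
    (l.filter q).length ≤ (l.filter p).length := by
  induction l with
  | nil => simp
  | cons a t ih =>
    have ih' := ih (fun x hx => h x (List.mem_cons_of_mem _ hx))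
    by_cases hq : q a = true
    · have hp := h a List.mem_cons_self hq
      simp [hq, hp]; omega
    · simp only [List.filter_cons]
      rw [Bool.not_eq_true] at hq
      rw [hq]
      by_cases hp : p a = true <;> simp [hp] <;> omega

theorem pv_filter_lt {α : Type} (l : List α) (p q : α → Bool)
    (h : ∀ x ∈ l, q x = true → p x = true)
    (x : α) (hx : x ∈ l) (hpx : p x = true) (hqx : q x = false) :
    (l.filter q).length < (l.filter p).length := by
  induction l with
  | nil => cases hx
  | cons a t ih =>
    have h' : ∀ y ∈ t, q y = true → p y = true := fun y hy => h y (List.mem_cons_of_mem _ hy)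
    rcases List.mem_cons.mp hx with rfl | hxt
    · simp only [List.filter_cons, hqx, hpx]
      have := pv_filter_le t p q h'
      simp; omega
    · by_cases hq : q a = true
      · have hp := h a List.mem_cons_self hq
        simp only [List.filter_cons, hq, hp]
        have := ih h' hxt
        simp; omega
      · rw [Bool.not_eq_true] at hq
        simp only [List.filter_cons, hq]
        have := ih h' hxt
        by_cases hp : p a = true <;> simp [hp] <;> omega

-- membership facts about the visited set
theorem pv_mem_add {s : PySem.Set Int} {x u : Int} (h : x ∈ s) : x ∈ PySem.Set.add s u :=
  (PySem.Set.mem_add s u x).mpr (Or.inl h)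

-- one-step unfoldings of the two ports
theorem dfsA_pos {edges : List (Int × List Int)} {f : Nat} {u c : Int}
    {st : PySem.Set Int × List Int × List Int} (h : u ∈ st.1) :
    dfsA edges (f + 1) u c st = st := by
  rw [dfsA]; simp [h]

theorem dfsA_neg {edges : List (Int × List Int)} {f : Nat} {u c : Int}
    {st : PySem.Set Int × List Int × List Int} (h : u ∉ st.1) :
    dfsA edges (f + 1) u c st =
      (pvLook edges u).foldl (fun s v => dfsA edges f v (1 - c) s)
        (PySem.Set.add st.1 u,
          if c == 0 then (st.2.1 ++ [u], st.2.2) else (st.2.1, st.2.2 ++ [u])) := by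
  rw [dfsA]; simp [h]

theorem loopB_pos {edges : List (Int × List Int)} {f : Nat} {u c : Int}
    {rest : List (Int × Int)} {st : PySem.Set Int × List (Int × Int)} (h : u ∈ st.1) :
    loopB edges (f + 1) ((u, c) :: rest) st = loopB edges f rest st := by
  rw [loopB]; simp [h]

theorem loopB_neg {edges : List (Int × List Int)} {f : Nat} {u c : Int}
    {rest : List (Int × Int)} {st : PySem.Set Int × List (Int × Int)} (h : u ∉ st.1) :
    loopB edges (f + 1) ((u, c) :: rest) st =
      loopB edges f ((pvLook edges u).map (fun v => (v, 1 - c)) ++ rest)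
        (PySem.Set.add st.1 u, st.2 ++ [(u, c)]) := by
  rw [loopB]; simp [h]

theorem pvUnv_le {edges : List (Int × List Int)} {v v' : List Int}
    (h : ∀ x, x ∈ v → x ∈ v') : pvUnv edges v' ≤ pvUnv edges v := by
  apply pv_filter_le
  intro x _ hq
  simp only [Bool.not_eq_eq_eq_not, Bool.not_true, List.contains_eq_mem,
    decide_eq_false_iff_not] at *
  exact fun hx => hq (h x hx)

theorem pvUnv_lt {edges : List (Int × List Int)} {v : List Int} {u : Int}
    (hk : u ∈ edges.map Prod.fst) (hv : u ∉ v) :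
    pvUnv edges (PySem.Set.add v u) < pvUnv edges v := by
  apply pv_filter_lt _ _ _ _ u hk
  · simp only [Bool.not_eq_eq_eq_not, Bool.not_true, List.contains_eq_mem,
      decide_eq_false_iff_not] at *
    exact hv
  · simp only [Bool.not_eq_eq_eq_not, Bool.not_false, List.contains_eq_mem, decide_eq_true_eq]
    exact (PySem.Set.mem_add _ _ _).mpr (Or.inr rfl)
  · intro x _ hq
    simp only [Bool.not_eq_eq_eq_not, Bool.not_true, List.contains_eq_mem,
      decide_eq_false_iff_not] at *
    exact fun hx => hq (pv_mem_add hx)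

-- what pvLook returns: either [] or some entry's neighbor list
theorem pvLook_cases (edges : List (Int × List Int)) (u : Int) :
    pvLook edges u = [] ∨ ∃ p ∈ edges, pvLook edges u = p.2 := by
  unfold pvLook
  cases h : edges.find? (fun p => p.1 == u) with
  | none => left; rfl
  | some p => right; exact ⟨p, List.mem_of_find?_eq_some h, rfl⟩

theorem pvLook_of_not_key {edges : List (Int × List Int)} {u : Int}
    (h : u ∉ edges.map Prod.fst) : pvLook edges u = [] := by
  unfold pvLook
  cases hf : edges.find? (fun p => p.1 == u) with
  | none => rfl
  | some p =>
    exfalso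
    have hm := List.mem_of_find?_eq_some hf
    have he := List.find?_some hf
    simp only [beq_iff_eq] at he
    exact h (he ▸ List.mem_map_of_mem hm)

theorem pvLook_len_le {edges : List (Int × List Int)} (u : Int) :
    (pvLook edges u).length ≤ (edges.map (fun p => p.2.length)).sum := by
  rcases pvLook_cases edges u with h | ⟨p, hp, h⟩
  · simp [h]
  · rw [h]
    exact List.single_le_sum (by simp) _ (List.mem_map_of_mem hp)

-- visited only grows under dfsA
theorem dfsA_mono (edges : List (Int × List Int)) :
    ∀ f u c st x, x ∈ st.1 → x ∈ (dfsA edges f u c st).1 := by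
  intro f
  induction f with
  | zero => intro u c st x hx; exact hx
  | succ f ih =>
    intro u c st x hx
    by_cases h : u ∈ st.1
    · rw [dfsA_pos h]; exact hx
    · rw [dfsA_neg h]
      exact pv_foldl_pres _ _ _ (fun s v _ hs => ih v (1 - c) s x hs) (pv_mem_add hx)

theorem pvUnv_dfsA_le (edges : List (Int × List Int)) (f : Nat) (u c : Int)
    (st : PySem.Set Int × List Int × List Int) :
    pvUnv edges (dfsA edges f u c st).1 ≤ pvUnv edges st.1 :=
  pvUnv_le (fun x hx => dfsA_mono edges f u c st x hx)

-- fuel irrelevance for dfsA: any fuel above the number of unvisited keys gives the same result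
theorem dfsA_fuel (edges : List (Int × List Int)) :
    ∀ f f' u c st, pvUnv edges st.1 + 1 ≤ f → pvUnv edges st.1 + 1 ≤ f' →
      dfsA edges f u c st = dfsA edges f' u c st := by
  intro f
  induction f with
  | zero => intro f' u c st h _; omega
  | succ f ih =>
    intro f' u c st hf hf'
    cases f' with
    | zero => omega
    | succ g =>
      by_cases h : u ∈ st.1
      · rw [dfsA_pos h, dfsA_pos h]
      · rw [dfsA_neg h, dfsA_neg h]
        by_cases hk : u ∈ edges.map Prod.fst
        · have hdec := pvUnv_lt (edges := edges) hk h
          apply pv_foldl_congr_inv (P := fun s => pvUnv edges s.1 + 1 ≤ f ∧ pvUnv edges s.1 + 1 ≤ g)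
          · intro s v _ ⟨h1, h2⟩; exact ih g v (1 - c) s h1 h2
          · intro s v _ ⟨h1, h2⟩
            have := pvUnv_dfsA_le edges f v (1 - c) s
            exact ⟨by omega, by omega⟩
          · constructor <;> · simp only []; omega
        · rw [pvLook_of_not_key hk]
          rfl

-- the bridge: projecting B's single-stack run by color equals folding A's dfs over the stack
theorem pv_bridge (edges : List (Int × List Int))
    (hPre : ∀ p ∈ edges, ∀ v ∈ p.2, v ∈ edges.map Prod.fst) :
    ∀ fB tasks st fA, (∀ t ∈ tasks, t.1 ∈ edges.map Prod.fst) →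
      (∀ t ∈ tasks, t.2 = 0 ∨ t.2 = 1) →
      pvUnv edges st.1 + 1 ≤ fA →
      tasks.length + pvUnv edges st.1 * ((edges.map (fun p => p.2.length)).sum + 1) ≤ fB →
      ((loopB edges fB tasks st).1,
        pvSp 0 (loopB edges fB tasks st).2, pvSp 1 (loopB edges fB tasks st).2) =
        tasks.foldl (fun s t => dfsA edges fA t.1 t.2 s) (st.1, pvSp 0 st.2, pvSp 1 st.2) := by
  intro fB
  induction fB with
  | zero =>
    intro tasks st fA _ _ _ hfB
    have : tasks = [] := List.eq_nil_of_length_eq_zero (by omega)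
    subst this; rfl
  | succ f ih =>
    intro tasks st fA htasks hcol hfA hfB
    match tasks with
    | [] => rfl
    | (u, c) :: rest =>
      rw [List.foldl_cons]
      have hrest : ∀ t ∈ rest, t.1 ∈ edges.map Prod.fst :=
        fun t ht => htasks t (List.mem_cons_of_mem _ ht)
      have hcrest : ∀ t ∈ rest, t.2 = 0 ∨ t.2 = 1 :=
        fun t ht => hcol t (List.mem_cons_of_mem _ ht)
      by_cases h : u ∈ st.1
      · rw [loopB_pos h]
        have hstep : dfsA edges fA (u, c).1 (u, c).2 (st.1, pvSp 0 st.2, pvSp 1 st.2)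
            = (st.1, pvSp 0 st.2, pvSp 1 st.2) := by
          cases fA with
          | zero => omega
          | succ g => exact dfsA_pos h
        rw [hstep]
        exact ih rest st fA hrest hcrest hfA (by simp at hfB ⊢; omega)
      · rw [loopB_neg h]
        have hu : u ∉ st.1 := h
        have hk : u ∈ edges.map Prod.fst := htasks (u, c) List.mem_cons_self
        set E := (edges.map (fun p => p.2.length)).sum with hE
        set st1 : PySem.Set Int × List (Int × Int) :=
          (PySem.Set.add st.1 u, st.2 ++ [(u, c)]) with hst1
        have hdec : pvUnv edges st1.1 < pvUnv edges st.1 := pvUnv_lt hk hu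
        have hlen : (pvLook edges u).length ≤ E := pvLook_len_le u
        cases fA with
        | zero => omega
        | succ g =>
          have hIH := ih ((pvLook edges u).map (fun v => (v, 1 - c)) ++ rest) st1 (g + 1)
            (by
              intro t ht
              rcases List.mem_append.mp ht with hl | hr
              · obtain ⟨v, hv, rfl⟩ := List.mem_map.mp hl
                rcases pvLook_cases edges u with h0 | ⟨p, hp, hpl⟩
                · rw [h0] at hv; cases hv
                · exact hPre p hp v (hpl ▸ hv)
              · exact hrest t hr)
            (by
              intro t ht
              rcases List.mem_append.mp ht with hl | hr
              · obtain ⟨v, hv, rfl⟩ := List.mem_map.mp hl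
                rcases hcol (u, c) List.mem_cons_self with h0 | h1
                · right; simp at h0 ⊢; omega
                · left; simp at h1 ⊢; omega
              · exact hcrest t hr)
            (by omega)
            (by
              simp only [List.length_append, List.length_map, List.length_cons] at hfB ⊢
              have h1 : 1 ≤ pvUnv edges st.1 := by omega
              nlinarith [hdec, hlen, hfB])
          rw [hIH, List.foldl_append, List.foldl_map]
          -- the popped node's dfsA call unfolds to the same fold over its neighbors
          rw [dfsA_neg h]
          have hsp : (PySem.Set.add st.1 u,
              if c == 0 then (pvSp 0 st.2 ++ [u], pvSp 1 st.2)
              else (pvSp 0 st.2, pvSp 1 st.2 ++ [u]))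
              = (st1.1, pvSp 0 st1.2, pvSp 1 st1.2) := by
            rw [hst1]
            rcases hcol (u, c) List.mem_cons_self with h0 | h0 <;>
              simp only at h0 <;> subst h0 <;> simp [pvSp_append]
          rw [hsp]
          congr 1
          apply pv_foldl_congr_inv (P := fun s => pvUnv edges s.1 + 1 ≤ g)
          · intro s v _ h1; exact dfsA_fuel edges (g + 1) g v (1 - c) s (by omega) h1
          · intro s v _ h1
            have := pvUnv_dfsA_le edges (g + 1) (v, 1 - c).1 (v, 1 - c).2 s
            omega
          · simp only []; omega

theorem pvUnv_le_len (edges : List (Int × List Int)) (vis : List Int) :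
    pvUnv edges vis ≤ edges.length := by
  unfold pvUnv
  calc ((edges.map Prod.fst).filter _).length ≤ (edges.map Prod.fst).length :=
        List.length_filter_le _ _
    _ = edges.length := by simp

-- ===== VERDICT (by name: the statement is the Claim_ definition above) =====
theorem make_coloring_spec : Claim_equal_make_coloring := by
  intro edges _ hPre
  unfold Spec_make_coloring
  simp only [make_coloring, make_coloring_alt, List.foldl_map]
  have hb := pv_bridge edges hPre.2
    (edges.length * ((edges.map (fun p => p.2.length)).sum + 2) + 2)
    (edges.map (fun p => (p.1, (0 : Int)))) (PySem.Set.empty, []) (edges.length + 2)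
    (by intro t ht; obtain ⟨p, hp, rfl⟩ := List.mem_map.mp ht; exact List.mem_map_of_mem hp)
    (by intro t ht; obtain ⟨p, hp, rfl⟩ := List.mem_map.mp ht; left; rfl)
    (by have := pvUnv_le_len edges []; simp only [PySem.Set.empty]; omega)
    (by
      have h1 := pvUnv_le_len edges []
      have h2 := Nat.mul_le_mul_right ((edges.map (fun p => p.2.length)).sum + 1) h1
      simp only [PySem.Set.empty, List.length_map]
      nlinarith)
  rw [List.foldl_map] at hb
  simp only [pvSp, List.filter_nil, List.map_nil] at hb
  rw [← hb]
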